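-- pv_equiv track=rewrite | github.com/psenk/AdventOfCode | src/day_nine.py | get_free_space
-- ===== SOURCE A (Python) =====
-- def get_free_space(disk):
--     free_space = []
--     i = 0
--     while i < len(disk):
--         if disk[i] == '.':
--             start = i
--             while i < len(disk) and disk[i] == '.':
--                 i += 1
--             free_space.append((start, i - start))
--         else:
--             i += 1
--     return free_space
-- ===== SOURCE B (Python) =====
-- def get_free_space(disk):
--     runs = []
--     for i, c in enumerate(disk):
--         if c == '.':
--             if runs and runs[-1][0] + runs[-1][1] == i:
--                 s, l = runs[-1]
--                 runs[-1] = (s, l + 1)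
--             else:
--                 runs.append((i, 1))
--     return runs
-- ===== Notes on version B (the rewrite author's own statement) =====
-- stated objective: simpler
-- what changed: Replaces the nested index-walking while-loops with a single for-loop over enumerate that either extends the last recorded run or starts a new one.
import Mathlib
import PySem

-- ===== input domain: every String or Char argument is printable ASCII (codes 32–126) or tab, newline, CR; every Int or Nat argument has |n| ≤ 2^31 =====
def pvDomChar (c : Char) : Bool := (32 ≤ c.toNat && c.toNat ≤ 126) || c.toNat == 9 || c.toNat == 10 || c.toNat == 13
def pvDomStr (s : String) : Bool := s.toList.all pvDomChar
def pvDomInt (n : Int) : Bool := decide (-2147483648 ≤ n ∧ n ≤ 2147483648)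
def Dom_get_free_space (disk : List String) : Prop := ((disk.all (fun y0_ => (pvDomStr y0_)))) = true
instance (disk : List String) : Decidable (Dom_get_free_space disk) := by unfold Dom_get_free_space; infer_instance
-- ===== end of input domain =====

-- B replaces A's nested index-walking while-loops by one pass that extends the last recorded run
-- or starts a new one (objective: simpler; same return value).

-- ===== PORT A =====
-- inner `while i < len(disk) and disk[i] == '.': i += 1` of A: returns the final i
def scanDots (disk : List String) (i : Nat) : Nat :=
  if h : i < disk.length ∧ disk.getD i "" = "." then scanDots disk (i + 1) else i
termination_by disk.length - i
decreasing_by omega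

theorem scanDots_ge (disk : List String) (i : Nat) : i ≤ scanDots disk i := by
  fun_induction scanDots disk i with
  | case1 i h ih => omega
  | case2 i h => omega

theorem scanDots_gt (disk : List String) (i : Nat)
    (h : i < disk.length) (hd : disk.getD i "" = ".") : i < scanDots disk i := by
  rw [scanDots, dif_pos ⟨h, hd⟩]
  have := scanDots_ge disk (i + 1)
  omega

-- outer `while i < len(disk)` of A
def freeLoop (disk : List String) (i : Nat) (acc : List (Int × Int)) : List (Int × Int) :=
  if h : i < disk.length then
    if hd : disk.getD i "" = "." then
      freeLoop disk (scanDots disk i)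
        (acc ++ [((i : Int), (scanDots disk i : Int) - (i : Int))])
    else freeLoop disk (i + 1) acc
  else acc
termination_by disk.length - i
decreasing_by
  · have := scanDots_gt disk i h hd; omega
  · omega

def get_free_space (disk : List String) : List (Int × Int) := freeLoop disk 0 []

-- ===== PORT B =====
-- Python's `runs[-1] = (s, l + 1)` / `runs.append((i, 1))` branch on whether the last run ends at i
def addDot (p : Int) : List (Int × Int) → List (Int × Int)
  | [] => [(p, 1)]
  | [(s, l)] => if s + l = p then [(s, l + 1)] else [(s, l), (p, 1)]
  | r :: rs => r :: addDot p rs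

-- `for i, c in enumerate(disk)` loop of B
def altLoop (disk : List String) (pos : Int) (runs : List (Int × Int)) : List (Int × Int) :=
  match disk with
  | [] => runs
  | c :: t => altLoop t (pos + 1) (if c = "." then addDot pos runs else runs)

def get_free_space_alt (disk : List String) : List (Int × Int) := altLoop disk 0 []

-- ===== PRECONDITION & SPEC =====
def Spec_get_free_space (disk : List String) (out : List (Int × Int)) : Prop := out = get_free_space_alt disk
instance (disk : List String) (out : List (Int × Int)) : Decidable (Spec_get_free_space disk out) := by unfold Spec_get_free_space; infer_instance

-- ===== CLAIM (what is proved, stated in full; the proofs are below) =====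
def Claim_equal_get_free_space : Prop := ∀ (disk : List String), Dom_get_free_space disk → Spec_get_free_space disk (get_free_space disk)

-- ===== LEMMAS AND PROOFS =====

theorem addDot_append (p : Int) (a : List (Int × Int)) (s l : Int) :
    addDot p (a ++ [(s, l)]) = a ++ addDot p [(s, l)] := by
  induction a with
  | nil => rfl
  | cons x a ih =>
    cases a with
    | nil => simp [addDot]
    | cons y a => simp [addDot] at ih ⊢; exact ih

theorem addDot_extend (p : Int) (a : List (Int × Int)) (s : Int) :
    addDot p (a ++ [(s, p - s)]) = a ++ [(s, p - s + 1)] := by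
  rw [addDot_append]
  simp [addDot]

theorem addDot_new (p : Int) (a : List (Int × Int)) (s l : Int) (h : s + l ≠ p) :
    addDot p (a ++ [(s, l)]) = a ++ [(s, l), (p, 1)] := by
  rw [addDot_append]
  simp [addDot, h]

-- invariant carried through A's outer loop: the last recorded run ends at or before i,
-- and strictly before i if disk[i] is a dot
def RunInv (disk : List String) (i : Nat) (acc : List (Int × Int)) : Prop :=
  ∀ s l, acc.getLast? = some (s, l) →
    s + l ≤ (i : Int) ∧ (disk.getD i "" = "." → s + l < (i : Int))

-- folding a block of consecutive dots extends the run that ends at the current position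
theorem absorb (ds : List String) (hds : ∀ d ∈ ds, d = ".") :
    ∀ (rest : List String) (p : Int) (acc : List (Int × Int)) (s : Int),
      altLoop (ds ++ rest) p (acc ++ [(s, p - s)]) =
        altLoop rest (p + ds.length) (acc ++ [(s, p + ds.length - s)]) := by
  induction ds with
  | nil => intro rest p acc s; simp
  | cons d ds ih =>
    intro rest p acc s
    have hd : d = "." := hds d (by simp)
    have hds' : ∀ d ∈ ds, d = "." := fun d hm => hds d (by simp [hm])
    subst hd
    simp only [List.cons_append, altLoop, if_true, addDot_extend]
    have h1 : p - s + 1 = (p + 1) - s := by ring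
    rw [h1, ih hds' rest (p + 1) acc s]
    have e1 : p + 1 + ((ds.length : Nat) : Int) = p + ((("." :: ds : List String).length : Nat) : Int) := by
      simp only [List.length_cons]
      push_cast
      ring
    rw [e1]

theorem scanDots_eq (disk : List String) (i : Nat) :
    scanDots disk i = i + ((disk.drop i).takeWhile (fun c => c == ".")).length := by
  fun_induction scanDots disk i with
  | case1 i h ih =>
    obtain ⟨hlt, hd⟩ := h
    rw [List.drop_eq_getElem_cons hlt]
    have hb : (disk[i] == ".") = true := by
      rw [List.getD_eq_getElem _ _ hlt] at hd; simpa using hd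
    simp [List.takeWhile, hb, ih]
    omega
  | case2 i h =>
    by_cases hlt : i < disk.length
    · have hd : disk.getD i "" ≠ "." := fun hc => h ⟨hlt, hc⟩
      rw [List.drop_eq_getElem_cons hlt]
      have hb : (disk[i] == ".") = false := by
        rw [List.getD_eq_getElem _ _ hlt] at hd; simpa using hd
      simp [List.takeWhile, hb]
    · rw [List.drop_eq_nil_of_le (by omega)]
      simp
  
theorem scanDots_stop (disk : List String) (i : Nat)
    (h : scanDots disk i < disk.length) : disk.getD (scanDots disk i) "" ≠ "." := by
  fun_induction scanDots disk i with
  | case1 i hc ih => exact ih h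
  | case2 i hc => exact fun hd => hc ⟨h, hd⟩

theorem scanDots_le (disk : List String) (i : Nat) (h : i ≤ disk.length) :
    scanDots disk i ≤ disk.length := by
  rw [scanDots_eq]
  have h1 : ((disk.drop i).takeWhile (fun c => c == ".")).length ≤ (disk.drop i).length :=
    (List.IsPrefix.length_le (List.takeWhile_prefix _))
  simp at h1
  omega

theorem main_loop (disk : List String) :
    ∀ (n i : Nat) (acc : List (Int × Int)), disk.length - i ≤ n → RunInv disk i acc →
      freeLoop disk i acc = altLoop (disk.drop i) (i : Int) acc := by
  intro n
  induction n with
  | zero =>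
    intro i acc hn _
    rw [freeLoop, dif_neg (by omega), List.drop_eq_nil_of_le (by omega), altLoop]
  | succ n ih =>
    intro i acc hn hinv
    by_cases hlt : i < disk.length
    · by_cases hd : disk.getD i "" = "."
      · -- a run of dots starts at i
        set j := scanDots disk i with hj
        have hji : i < j := scanDots_gt disk i hlt hd
        have hjle : j ≤ disk.length := scanDots_le disk i (by omega)
        rw [freeLoop, dif_pos hlt, dif_pos hd]
        -- decompose drop i into the dot-block and the rest
        set ds := (disk.drop i).takeWhile (fun c => c == ".") with hdsdef
        set rest := (disk.drop i).dropWhile (fun c => c == ".") with hrest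
        have hsplit : disk.drop i = ds ++ rest := (List.takeWhile_append_dropWhile).symm
        have hk : j = i + ds.length := scanDots_eq disk i
        have hdots : ∀ d ∈ ds, d = "." := by
          intro d hm
          have := List.mem_takeWhile_imp hm
          simpa using this
        have hrestj : rest = disk.drop j := by
          have h3 : List.drop ds.length (disk.drop i) = disk.drop (i + ds.length) :=
            List.drop_drop
          rw [hsplit, List.drop_left] at h3
          rw [h3]; congr 1; omega
        obtain ⟨d₀, ds', hds0⟩ : ∃ d₀ ds', ds = d₀ :: ds' := by
          cases hdse : ds with
          | nil => exfalso; rw [hdse] at hk; simp at hk; omega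
          | cons a b => exact ⟨a, b, rfl⟩
        have hd0 : d₀ = "." := hdots d₀ (by simp [hds0])
        -- first dot starts a new run
        have hnew : addDot (i : Int) acc = acc ++ [((i : Int), 1)] := by
          rcases List.eq_nil_or_concat acc with hnil | ⟨a, ⟨s, l⟩, hconc⟩
          · simp [hnil, addDot]
          · rw [List.concat_eq_append] at hconc
            have hlast : acc.getLast? = some (s, l) := by rw [hconc]; simp
            have := (hinv s l hlast).2 hd
            rw [hconc, addDot_new _ _ _ _ (by omega)]
            simp
        -- invariant at j with the new run appended
        have hinv' : RunInv disk j (acc ++ [((i : Int), (j : Int) - (i : Int))]) := by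
          intro s l hlast
          simp only [List.getLast?_concat, Option.some.injEq, Prod.mk.injEq] at hlast
          obtain ⟨rfl, rfl⟩ := hlast
          refine ⟨by omega, fun hdj => ?_⟩
          exfalso
          by_cases hjlt : j < disk.length
          · exact scanDots_stop disk i (hj ▸ hjlt) (hj ▸ hdj)
          · rw [List.getD_eq_default _ _ (by omega)] at hdj
            exact absurd hdj (by decide)
        rw [← hj, ih j (acc ++ [((i : Int), (j : Int) - (i : Int))]) (by omega) hinv']
        -- reduce the B side over the dot block
        rw [hsplit, hds0]
        subst hd0
        simp only [List.cons_append, altLoop, if_true, hnew]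
        have h1 : ((i : Int), (1 : Int)) = ((i : Int), ((i : Int) + 1) - i) := by norm_num
        rw [h1, absorb ds' (fun d hm => hdots d (by simp [hds0, hm])) rest ((i : Int) + 1) acc i]
        have hjint : ((i : Int) + 1) + (((ds' : List String).length : Nat) : Int) = (j : Int) := by
          have h5 : ds.length = ds'.length + 1 := by rw [hds0]; simp
          omega
        rw [hjint, hrestj]

      · -- disk[i] is not a dot: both sides skip it
        rw [freeLoop, dif_pos hlt, dif_neg hd]
        rw [List.drop_eq_getElem_cons hlt, altLoop]
        have hne : ¬ disk[i] = "." := by rwa [List.getD_eq_getElem _ _ hlt] at hd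
        rw [if_neg hne]
        have hcast : (i : Int) + 1 = ((i + 1 : Nat) : Int) := by push_cast; ring
        rw [hcast, ih (i + 1) acc (by omega) ?_]
        intro s l hlast
        have := (hinv s l hlast).1
        constructor
        · push_cast; omega
        · intro _; push_cast; omega
    · rw [freeLoop, dif_neg hlt, List.drop_eq_nil_of_le (by omega), altLoop]

-- ===== VERDICT (by name: the statement is the Claim_ definition above) =====
theorem get_free_space_spec : Claim_equal_get_free_space := by
  intro disk _
  unfold Spec_get_free_space get_free_space get_free_space_alt
  have := main_loop disk disk.length 0 [] (by omega) (by intro s l h; simp at h)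
  simpa using this
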